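-- pv_equiv track=rewrite | github.com/SSH1007/Algorithm | 프로그래머스/lv0/120812. 최빈값 구하기/최빈값 구하기.py | solution
-- ===== SOURCE A (Python) =====
-- def solution(array):
--     answer = 0
--     dic = dict()
--     for a in array:
--         if a not in dic:
--             dic[a] = 1
--         else:
--             dic[a] += 1
--     lst = list(dic.items())
--     lst.sort(key = lambda x : x[1], reverse = True)
--     if len(lst)>1 and lst[0][1] == lst[1][1]:
--         answer = -1
--     else:
--         answer = lst[0][0]
--
--     return answer
-- ===== SOURCE B (Python) =====
-- def solution(array):
--     s = sorted(array)
--     # run-length encode the sorted list into (value, count) pairs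
--     runs = []
--     i = 0
--     while i < len(s):
--         j = i + 1
--         while j < len(s) and s[j] == s[i]:
--             j += 1
--         runs.append((s[i], j - i))
--         i = j
--     best = max(c for _, c in runs)
--     tops = [v for v, c in runs if c == best]
--     return tops[0] if len(tops) == 1 else -1
-- ===== Notes on version B (the rewrite author's own statement) =====
-- stated objective: alternative
-- what changed: Frequencies are computed by sorting the array and run-length-encoding consecutive equal elements instead of building a hash dict, and the winner is selected by a max-count scan plus a filter for ties instead of sorting the (value,count) pairs by count and comparing the top two.
import Mathlib
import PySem

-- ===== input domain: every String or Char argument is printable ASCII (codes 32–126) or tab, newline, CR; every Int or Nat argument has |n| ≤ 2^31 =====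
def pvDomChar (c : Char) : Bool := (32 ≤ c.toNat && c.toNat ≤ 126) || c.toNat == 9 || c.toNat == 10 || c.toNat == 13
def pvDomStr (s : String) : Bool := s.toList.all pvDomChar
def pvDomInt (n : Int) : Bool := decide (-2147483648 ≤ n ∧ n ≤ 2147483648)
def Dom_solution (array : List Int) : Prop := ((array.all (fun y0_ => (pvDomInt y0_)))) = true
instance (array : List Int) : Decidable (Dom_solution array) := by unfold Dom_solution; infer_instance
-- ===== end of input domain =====

-- B computes frequencies by sorting + run-length encoding and selects via max+filter
-- instead of A's dict counting + sort-by-count; alternative decomposition, same results.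


-- ===== PORT A =====
def solution (array : List Int) : Int :=
  let dic := array.foldl (fun d a =>
    if d.contains a = false then d.insert a 1 else d.insert a (d.getD a 0 + 1))
    (PySem.Dict.empty : PySem.Dict Int Int)
  let lst := PySem.List.sorted dic.items (fun x => x.2) true
  match lst with
  | [] => 0                                   -- Python raises IndexError here; excluded by Pre_solution
  | [x] => x.1
  | x :: y :: _ => if x.2 = y.2 then -1 else x.1

-- ===== PORT B =====
-- inner while loop: how far j advances past i while s[j] == s[i]
def countLead (x : Int) : List Int → Nat
  | [] => 0
  | y :: ys => if y = x then countLead x ys + 1 else 0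

-- outer while loop over i: emit one (value, run length) pair per run, jump i to j
def runsOf : List Int → List (Int × Int)
  | [] => []
  | x :: xs =>
      let n := countLead x xs
      (x, (n : Int) + 1) :: runsOf (xs.drop n)
termination_by l => l.length
decreasing_by simp [List.length_drop]

def solution_alt (array : List Int) : Int :=
  let s := PySem.List.sorted array (fun x => x) false
  let runs := runsOf s
  match runs with
  | [] => 0                                   -- Python: max() raises ValueError here; excluded by Pre_solution
  | r :: rest =>
    let best := rest.foldl (fun m p => max m p.2) r.2
    let tops := (runs.filter (fun p => p.2 = best)).map (fun p => p.1)
    match tops with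
    | [t] => t
    | _ => -1

-- ===== PRECONDITION & SPEC =====
-- A raises IndexError on the empty list (lst[0] on an empty dict's items); excluded.
def Pre_solution (array : List Int) : Prop := array ≠ []
instance (array : List Int) : Decidable (Pre_solution array) := by unfold Pre_solution; infer_instance
def pvWitness_solution : List Int := [1, 2, 2]

def Spec_solution (array : List Int) (out : Int) : Prop := out = solution_alt array
instance (array : List Int) (out : Int) : Decidable (Spec_solution array out) := by unfold Spec_solution; infer_instance

-- ===== CLAIM (what is proved, stated in full; the proofs are below) =====
def Claim_equal_solution : Prop := ∀ (array : List Int), Dom_solution array → Pre_solution array → Spec_solution array (solution array)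

-- ===== LEMMAS AND PROOFS =====

-- unique mode: k is the strict most-frequent element of l
def UMode (l : List Int) (k : Int) : Prop :=
  k ∈ l ∧ (∀ j ∈ l, l.count j ≤ l.count k) ∧ (∀ j ∈ l, l.count j = l.count k → j = k)

-- A's counting loop builds exactly Counter(array)
lemma dict_eq_counter (array : List Int) :
    array.foldl (fun d a =>
      if d.contains a = false then d.insert a 1 else d.insert a (d.getD a 0 + 1))
      (PySem.Dict.empty : PySem.Dict Int Int) = PySem.Dict.counter array := by
  rw [← PySem.Dict.foldl_insert_getD_add_one_eq_counter]
  congr 1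
  funext d a
  by_cases h : d.contains a
  · simp [h]
  · have h0 : d.getD a 0 = 0 :=
      PySem.Dict.getD_of_not_contains d 0 (by simpa using h)
    simp [h, h0]

lemma solutionA_char (array : List Int) (h : array ≠ []) :
    (∀ k, UMode array k → solution array = k) ∧
      ((∀ k, ¬ UMode array k) → solution array = -1) := by
  have hItems : (array.foldl (fun d a =>
      if d.contains a = false then d.insert a 1 else d.insert a (d.getD a 0 + 1))
      (PySem.Dict.empty : PySem.Dict Int Int)).items
      = (PySem.Set.ofList array).map (fun k => (k, (List.count k array : Int))) := by
    rw [dict_eq_counter, PySem.Dict.items_counter]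
  set I := (PySem.Set.ofList array).map (fun k => (k, (List.count k array : Int))) with hIdef
  have hmem : ∀ p ∈ I, p.1 ∈ array ∧ p.2 = (List.count p.1 array : Int) := by
    intro p hp
    rw [hIdef] at hp
    obtain ⟨k, hk, rfl⟩ := List.mem_map.mp hp
    exact ⟨(PySem.Set.mem_ofList array k).mp hk, rfl⟩
  have hin : ∀ j ∈ array, (j, (List.count j array : Int)) ∈ I := by
    intro j hj
    rw [hIdef]
    exact List.mem_map.mpr ⟨j, (PySem.Set.mem_ofList array j).mpr hj, rfl⟩
  have hinj : ∀ p ∈ I, ∀ q ∈ I, p.1 = q.1 → p = q := by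
    intro p hp q hq hpq
    obtain ⟨_, h2⟩ := hmem p hp
    obtain ⟨_, h4⟩ := hmem q hq
    exact Prod.ext hpq (by rw [h2, h4, hpq])
  have hnodupI : I.Nodup := by
    rw [hIdef]
    refine List.Nodup.map ?_ (PySem.Set.nodup_ofList array)
    intro a b hab
    exact congrArg Prod.fst hab
  have hsol : solution array =
      (match PySem.List.sorted I (fun x => x.2) true with
        | [] => (0:Int)
        | [x] => x.1
        | x :: y :: _ => if x.2 = y.2 then -1 else x.1) := by
    simp only [solution, hItems]
  rw [hsol]
  have hperm : (PySem.List.sorted I (fun x => x.2) true).Perm I :=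
    PySem.List.sorted_perm I (fun x => x.2) true
  rcases hlst : PySem.List.sorted I (fun x => x.2) true with _ | ⟨x, rest⟩
  · -- impossible: array nonempty
    exfalso
    rw [hlst] at hperm
    obtain ⟨a, ha⟩ := List.exists_mem_of_ne_nil array h
    exact absurd (hperm.symm.mem_iff.mp (hin a ha)) (List.not_mem_nil)
  rw [hlst] at hperm
  have hxI : x ∈ I := hperm.mem_iff.mp (List.mem_cons_self)
  obtain ⟨hx1, hx2⟩ := hmem x hxI
  have hmax : ∀ j ∈ array, (List.count j array : Int) ≤ x.2 := fun j hj =>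
    PySem.List.key_head_sorted_rev_ge I (fun p => p.2) hlst (j, (List.count j array : Int)) (hin j hj)
  have hret : ∀ k, UMode array k → x.1 = k := by
    intro k hk
    have h1 : List.count x.1 array ≤ List.count k array := hk.2.1 x.1 hx1
    have h2 : (List.count k array : Int) ≤ x.2 := hmax k hk.1
    rw [hx2] at h2
    exact hk.2.2 x.1 hx1 (le_antisymm h1 (by exact_mod_cast h2))
  have hnodupS : (x :: rest).Nodup := hperm.nodup_iff.mpr hnodupI
  rcases rest with _ | ⟨y, t⟩
  · -- one distinct value
    have hI_single : I = [x] := (List.singleton_perm.mp hperm).symm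
    constructor
    · intro k hk
      exact hret k hk
    · intro hno
      exfalso
      apply hno x.1
      refine ⟨hx1, fun j hj => ?_, fun j hj _ => ?_⟩
      · have := hmax j hj
        rw [hx2] at this
        exact_mod_cast this
      · have hjI := hin j hj
        rw [hI_single] at hjI
        simp only [List.mem_singleton] at hjI
        exact congrArg Prod.fst hjI
  · -- at least two distinct values
    have hpw : (x :: y :: t).Pairwise (fun a b => b.2 ≤ a.2) := by
      have := PySem.List.sorted_pairwise_rev I (fun p => p.2)
      rwa [hlst] at this
    have hyI : y ∈ I := hperm.mem_iff.mp (List.mem_cons_of_mem _ (List.mem_cons_self))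
    obtain ⟨hy1, hy2⟩ := hmem y hyI
    have hyx : y.2 ≤ x.2 := (List.pairwise_cons.mp hpw).1 y (List.mem_cons_self)
    by_cases hxy : x.2 = y.2
    · -- tie at the top: no unique mode, A returns -1
      have hxny : x ≠ y := by
        have := (List.pairwise_cons.mp hnodupS).1 y (List.mem_cons_self)
        exact this
      have hx1y1 : x.1 ≠ y.1 := fun he => hxny (hinj x hxI y hyI he)
      have hnom : ∀ k, ¬ UMode array k := by
        intro k hk
        have e1 : x.1 = k := hret k hk
        have hcy : List.count y.1 array = List.count k array := by
          have h1 : (List.count k array : Int) ≤ (List.count y.1 array : Int) := by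
            rw [← hy2, ← hxy]
            exact hmax k hk.1
          have h2 : List.count y.1 array ≤ List.count k array := hk.2.1 y.1 hy1
          omega
        have e2 : y.1 = k := hk.2.2 y.1 hy1 hcy
        exact hx1y1 (e1.trans e2.symm)
      constructor
      · intro k hk
        exact absurd hk (hnom k)
      · intro _
        simp [hxy]
    · -- strict winner: A returns x.1, which is the unique mode
      constructor
      · intro k hk
        simpa [hxy] using hret k hk
      · intro hno
        exfalso
        apply hno x.1
        refine ⟨hx1, fun j hj => ?_, fun j hj hcnt => ?_⟩
        · have := hmax j hj
          rw [hx2] at this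
          exact_mod_cast this
        · have hjS : (j, (List.count j array : Int)) ∈ x :: y :: t := by
            rw [← hlst]
            exact (PySem.List.mem_sorted I (fun p => p.2) true _).mpr (hin j hj)
          rcases List.mem_cons.mp hjS with heq | hrest
          · exact congrArg Prod.fst heq
          · exfalso
            have h2y : (List.count j array : Int) ≤ y.2 := by
              rcases List.mem_cons.mp hrest with heq2 | ht
              · exact le_of_eq (congrArg Prod.snd heq2)
              · exact (List.pairwise_cons.mp (List.pairwise_cons.mp hpw).2).1 _ ht
            rw [hcnt] at h2y
            exact hxy (le_antisymm (by rw [hx2]; exact h2y) hyx)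

lemma countLead_decomp (x : Int) (xs : List Int) (hge : ∀ y ∈ xs, x ≤ y)
    (hpw : xs.Pairwise (· ≤ ·)) :
    xs.take (countLead x xs) = List.replicate (countLead x xs) x ∧
      ∀ y ∈ xs.drop (countLead x xs), x < y := by
  induction xs with
  | nil => simp [countLead]
  | cons y ys ih =>
    rcases List.pairwise_cons.mp hpw with ⟨hyle, hpw'⟩
    by_cases hyx : y = x
    · subst hyx
      have hge' : ∀ z ∈ ys, y ≤ z := hyle
      obtain ⟨ht, hd⟩ := ih hge' hpw'
      simp only [countLead, if_pos]
      exact ⟨by simp [List.replicate_succ, ht], by simpa using hd⟩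
    · have hxy : x < y := lt_of_le_of_ne (hge y List.mem_cons_self) (Ne.symm hyx)
      simp only [countLead, if_neg hyx]
      refine ⟨by simp, ?_⟩
      intro z hz
      simp only [List.drop_zero] at hz
      rcases List.mem_cons.mp hz with rfl | hzys
      · exact hxy
      · exact lt_of_lt_of_le hxy (hyle z hzys)

lemma runsOf_spec (l : List Int) (hpw : l.Pairwise (· ≤ ·)) :
    (∀ p ∈ runsOf l, p.1 ∈ l ∧ p.2 = (l.count p.1 : Int)) ∧
      (∀ v ∈ l, ∃ p ∈ runsOf l, p.1 = v) ∧
      (runsOf l).Pairwise (fun p q => p.1 < q.1) := by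
  induction l using runsOf.induct with
  | case1 => simp [runsOf]
  | case2 x xs n ih =>
    rcases List.pairwise_cons.mp hpw with ⟨hge, hpw'⟩
    obtain ⟨htake, hdrop⟩ := countLead_decomp x xs hge hpw'
    have hxs : xs = List.replicate (countLead x xs) x ++ xs.drop (countLead x xs) := by
      conv_lhs => rw [← List.take_append_drop (countLead x xs) xs]
      rw [htake]
    have hxnr : x ∉ xs.drop (countLead x xs) := fun hc => lt_irrefl x (hdrop x hc)
    have hrpw : (xs.drop (countLead x xs)).Pairwise (· ≤ ·) :=
      hpw'.sublist (List.drop_sublist _ _)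
    have hrun : runsOf (x :: xs) =
        (x, (countLead x xs : Int) + 1) :: runsOf (xs.drop (countLead x xs)) := by
      rw [runsOf]
    have hcx : List.count x (x :: xs) = countLead x xs + 1 := by
      rw [List.count_cons_self]
      conv_lhs => rw [hxs]
      rw [List.count_append, List.count_replicate,
        List.count_eq_zero_of_not_mem hxnr]
      simp
    have hcne : ∀ v, v ≠ x →
        List.count v (x :: xs) = List.count v (xs.drop (countLead x xs)) := by
      intro v hv
      rw [List.count_cons_of_ne (Ne.symm hv)]
      conv_lhs => rw [hxs]
      rw [List.count_append, List.count_replicate]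
      simp [Ne.symm hv]
    have hmem : ∀ v, v ∈ (x :: xs) ↔ v = x ∨ v ∈ xs.drop (countLead x xs) := by
      intro v
      constructor
      · intro hv
        rcases List.mem_cons.mp hv with rfl | hvxs
        · exact Or.inl rfl
        · rw [hxs] at hvxs
          rcases List.mem_append.mp hvxs with hrep | hdr
          · exact Or.inl (List.eq_of_mem_replicate hrep)
          · exact Or.inr hdr
      · intro hv
        rcases hv with rfl | hdr
        · exact List.mem_cons_self
        · exact List.mem_cons_of_mem _ (by rw [hxs]; exact List.mem_append_right _ hdr)
    obtain ⟨ih1, ih2, ih3⟩ := ih hrpw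
    refine ⟨?_, ?_, ?_⟩
    · intro p hp
      rw [hrun] at hp
      rcases List.mem_cons.mp hp with rfl | hpr
      · exact ⟨List.mem_cons_self, by rw [hcx]; push_cast; ring⟩
      · obtain ⟨hp1, hp2⟩ := ih1 p hpr
        have hpx : p.1 ≠ x := fun he => hxnr (by rw [he] at hp1; exact hp1)
        refine ⟨List.mem_cons_of_mem _ ((List.drop_sublist n xs).subset hp1), ?_⟩
        rw [hcne p.1 hpx]
        exact hp2
    · intro v hv
      rcases (hmem v).mp hv with rfl | hdr
      · exact ⟨(v, (countLead v xs : Int) + 1), by rw [hrun]; exact List.mem_cons_self, rfl⟩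
      · obtain ⟨p, hp, hpe⟩ := ih2 v hdr
        exact ⟨p, by rw [hrun]; exact List.mem_cons_of_mem _ hp, hpe⟩
    · rw [hrun]
      refine List.pairwise_cons.mpr ⟨?_, ih3⟩
      intro q hq
      exact hdrop q.1 (ih1 q hq).1

lemma foldl_max_spec (l : List (Int × Int)) (a : Int) :
    (l.foldl (fun m p => max m p.2) a = a ∨
        ∃ p ∈ l, l.foldl (fun m p => max m p.2) a = p.2) ∧
      a ≤ l.foldl (fun m p => max m p.2) a ∧
      ∀ p ∈ l, p.2 ≤ l.foldl (fun m p => max m p.2) a := by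
  induction l generalizing a with
  | nil => simp
  | cons q t ih =>
    obtain ⟨ih1, ih2, ih3⟩ := ih (max a q.2)
    simp only [List.foldl_cons]
    refine ⟨?_, ?_, ?_⟩
    · rcases ih1 with he | ⟨p, hp, hpe⟩
      · rcases max_cases a q.2 with ⟨hm, _⟩ | ⟨hm, _⟩
        · exact Or.inl (by rw [he, hm])
        · exact Or.inr ⟨q, List.mem_cons_self, by rw [he, hm]⟩
      · exact Or.inr ⟨p, List.mem_cons_of_mem _ hp, hpe⟩
    · exact le_trans (le_max_left _ _) ih2
    · intro p hp
      rcases List.mem_cons.mp hp with rfl | hpt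
      · exact le_trans (le_max_right _ _) ih2
      · exact ih3 p hpt

lemma solutionB_char (array : List Int) (h : array ≠ []) :
    (∀ k, UMode array k → solution_alt array = k) ∧
      ((∀ k, ¬ UMode array k) → solution_alt array = -1) := by
  set s := PySem.List.sorted array (fun x => x) false with hsdef
  have hspw : s.Pairwise (· ≤ ·) := PySem.List.sorted_pairwise array (fun x => x)
  have hperm : s.Perm array := PySem.List.sorted_perm array (fun x => x) false
  have hcount : ∀ v, List.count v s = List.count v array := fun v => hperm.count_eq v
  have hmemS : ∀ v : Int, v ∈ s ↔ v ∈ array := fun v => hperm.mem_iff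
  obtain ⟨hr1, hr2, hr3⟩ := runsOf_spec s hspw
  have hr1' : ∀ p ∈ runsOf s, p.1 ∈ array ∧ p.2 = (List.count p.1 array : Int) := by
    intro p hp
    obtain ⟨h1, h2⟩ := hr1 p hp
    exact ⟨(hmemS _).mp h1, by rw [h2, hcount]⟩
  have hr2' : ∀ v ∈ array, ∃ p ∈ runsOf s, p.1 = v := fun v hv => hr2 v ((hmemS v).mpr hv)
  rcases hruns : runsOf s with _ | ⟨r, rest⟩
  · exfalso
    obtain ⟨a, ha⟩ := List.exists_mem_of_ne_nil array h
    obtain ⟨p, hp, -⟩ := hr2' a ha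
    rw [hruns] at hp
    exact absurd hp List.not_mem_nil
  set best := rest.foldl (fun m p => max m p.2) r.2 with hbest
  obtain ⟨hat0, hub1, hub2⟩ := foldl_max_spec rest r.2
  rw [← hbest] at hat0 hub1 hub2
  have hub : ∀ p ∈ runsOf s, p.2 ≤ best := by
    rw [hruns]
    intro p hp
    rcases List.mem_cons.mp hp with rfl | hpr
    · exact hub1
    · exact hub2 p hpr
  have hat : ∃ p ∈ runsOf s, p.2 = best := by
    rw [hruns]
    rcases hat0 with he | ⟨p, hp, hpe⟩
    · exact ⟨r, List.mem_cons_self, he.symm⟩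
    · exact ⟨p, List.mem_cons_of_mem _ hp, hpe.symm⟩
  have hmaxA : ∀ j ∈ array, (List.count j array : Int) ≤ best := by
    intro j hj
    obtain ⟨p, hp, hpe⟩ := hr2' j hj
    have := (hr1' p hp).2
    rw [← hpe, ← this]
    exact hub p hp
  have hatA : ∃ w ∈ array, (List.count w array : Int) = best := by
    obtain ⟨p, hp, hpe⟩ := hat
    exact ⟨p.1, (hr1' p hp).1, by rw [← (hr1' p hp).2]; exact hpe⟩
  set tops := ((r :: rest).filter (fun p => decide (p.2 = best))).map (fun p => p.1)
    with htopsdef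
  have htmem : ∀ v, v ∈ tops ↔ v ∈ array ∧ (List.count v array : Int) = best := by
    intro v
    rw [htopsdef]
    constructor
    · intro hv
      obtain ⟨p, hpf, hpe⟩ := List.mem_map.mp hv
      have hpr : p ∈ runsOf s := by rw [hruns]; exact (List.mem_filter.mp hpf).1
      have hpb : p.2 = best := of_decide_eq_true (List.mem_filter.mp hpf).2
      obtain ⟨h1, h2⟩ := hr1' p hpr
      exact ⟨hpe ▸ h1, by rw [← hpe, ← h2]; exact hpb⟩
    · rintro ⟨hv, hvc⟩
      obtain ⟨p, hp, hpe⟩ := hr2' v hv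
      have h2 := (hr1' p hp).2
      rw [hruns] at hp
      refine List.mem_map.mpr ⟨p, List.mem_filter.mpr ⟨hp, ?_⟩, hpe⟩
      exact decide_eq_true (by rw [h2, hpe, hvc])
  have htnodup : tops.Nodup := by
    rw [htopsdef]
    have h3 : (r :: rest).Pairwise (fun p q : Int × Int => p.1 < q.1) := by
      rw [← hruns]; exact hr3
    have h4 : (((r :: rest).filter (fun p => decide (p.2 = best))).map
        (fun p : Int × Int => p.1)).Pairwise (· < ·) :=
      List.Pairwise.map (fun p : Int × Int => p.1) (fun a b hab => hab) (h3.filter _)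
    exact List.Pairwise.imp (fun hlt => ne_of_lt hlt) h4
  obtain ⟨w, hw, hwc⟩ := hatA
  have hwt : w ∈ tops := (htmem w).mpr ⟨hw, hwc⟩
  rcases htops : tops with _ | ⟨t1, ts⟩
  · exact absurd (htops ▸ hwt) List.not_mem_nil
  have ht1 : t1 ∈ array ∧ (List.count t1 array : Int) = best :=
    (htmem t1).mp (htops ▸ List.mem_cons_self)
  rcases ts with _ | ⟨t2, ts'⟩
  · -- unique top: B returns t1, the unique mode
    have hBsol : solution_alt array = t1 := by
      simp only [solution_alt, ← hsdef, hruns, ← hbest, ← htopsdef, htops]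
    have hum : UMode array t1 := by
      refine ⟨ht1.1, fun j hj => ?_, fun j hj hcnt => ?_⟩
      · have := hmaxA j hj
        rw [← ht1.2] at this
        exact_mod_cast this
      · have hjt : j ∈ tops := (htmem j).mpr ⟨hj, by rw [← ht1.2]; exact_mod_cast hcnt⟩
        rw [htops] at hjt
        simpa using hjt
    constructor
    · intro k hk
      rw [hBsol]
      have h1 : List.count t1 array ≤ List.count k array := hk.2.1 t1 ht1.1
      have h2 : (List.count k array : Int) ≤ best := hmaxA k hk.1
      rw [← ht1.2] at h2
      exact hk.2.2 t1 ht1.1 (le_antisymm h1 (by exact_mod_cast h2))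
    · intro hno
      exact absurd hum (hno t1)
  · -- tied tops: B returns -1, and there is no unique mode
    have hBsol : solution_alt array = -1 := by
      simp only [solution_alt, ← hsdef, hruns, ← hbest, ← htopsdef, htops]
    have ht2 : t2 ∈ array ∧ (List.count t2 array : Int) = best :=
      (htmem t2).mp (htops ▸ List.mem_cons_of_mem _ List.mem_cons_self)
    have ht12 : t1 ≠ t2 := by
      rw [htops] at htnodup
      exact fun he => (List.pairwise_cons.mp htnodup).1 t2 List.mem_cons_self he
    have hnom : ∀ k, ¬ UMode array k := by
      intro k hk
      have hkb : (List.count k array : Int) ≤ best := hmaxA k hk.1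
      have e1 : t1 = k := by
        refine hk.2.2 t1 ht1.1 (le_antisymm (hk.2.1 t1 ht1.1) ?_)
        rw [← ht1.2] at hkb
        exact_mod_cast hkb
      have e2 : t2 = k := by
        refine hk.2.2 t2 ht2.1 (le_antisymm (hk.2.1 t2 ht2.1) ?_)
        have hkb2 : (List.count k array : Int) ≤ best := hmaxA k hk.1
        rw [← ht2.2] at hkb2
        exact_mod_cast hkb2
      exact ht12 (e1.trans e2.symm)
    constructor
    · intro k hk
      exact absurd hk (hnom k)
    · intro _
      exact hBsol

-- ===== VERDICT (by name: the statement is the Claim_ definition above) =====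
theorem solution_spec : Claim_equal_solution := by
  intro array _ hpre
  unfold Spec_solution
  have hA := solutionA_char array hpre
  have hB := solutionB_char array hpre
  by_cases h : ∃ k, UMode array k
  · obtain ⟨k, hk⟩ := h
    rw [hA.1 k hk, hB.1 k hk]
  · have hno : ∀ k, ¬ UMode array k := fun k hk => h ⟨k, hk⟩
    rw [hA.2 hno, hB.2 hno]
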